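-- pv_equiv track=rewrite | github.com/derrickhu/game2D_huahua | scripts/process_furniture_tray_tab_sheet.py | axis_segments
-- ===== SOURCE A (Python) =====
-- from typing import List, Tuple
--
-- def axis_segments(total: int, count: int) -> List[Tuple[int, int]]:
--     base = total // count
--     rem = total % count
--     out: List[Tuple[int, int]] = []
--     pos = 0
--     for i in range(count):
--         sz = base + (1 if i < rem else 0)
--         out.append((pos, sz))
--         pos += sz
--     assert pos == total, (pos, total)
--     return out
-- ===== SOURCE B (Python) =====
-- from typing import List, Tuple
--
-- def axis_segments(total: int, count: int) -> List[Tuple[int, int]]: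
--     base = total // count
--     rem = total % count
--     return [(i * base + min(i, rem), base + (1 if i < rem else 0))
--             for i in range(count)]
-- ===== Notes on version B (the rewrite author's own statement) =====
-- stated objective: simpler
-- what changed: Replaces the loop threading a running position accumulator with a comprehension computing each segment independently by the closed form position = i*base + min(i, rem), and drops the never-firing assert.
import Mathlib
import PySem

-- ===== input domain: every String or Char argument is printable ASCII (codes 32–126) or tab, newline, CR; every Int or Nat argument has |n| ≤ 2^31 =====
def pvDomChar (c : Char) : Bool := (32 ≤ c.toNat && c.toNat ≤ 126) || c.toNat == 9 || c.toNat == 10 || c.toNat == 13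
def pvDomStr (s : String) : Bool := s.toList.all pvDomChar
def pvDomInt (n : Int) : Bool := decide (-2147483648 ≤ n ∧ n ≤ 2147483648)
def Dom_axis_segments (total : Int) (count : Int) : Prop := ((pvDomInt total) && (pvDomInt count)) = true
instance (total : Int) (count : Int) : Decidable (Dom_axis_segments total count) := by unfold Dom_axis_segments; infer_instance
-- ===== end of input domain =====

-- B replaces A's running-position accumulator with a closed-form per-segment comprehension (objective: simpler).

-- ===== PORT A =====
def axis_segments (total : Int) (count : Int) : List (Int × Int) :=
  let base := PySem.Int.floordiv total count
  let rem := PySem.Int.mod total count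
  let s := (PySem.List.pyRange 0 count 1).foldl
    (fun (s : List (Int × Int) × Int) i =>
      let sz := base + (if i < rem then 1 else 0)
      (s.1 ++ [(s.2, sz)], s.2 + sz))
    ([], 0)
  s.1

-- ===== PORT B =====
def axis_segments_alt (total : Int) (count : Int) : List (Int × Int) :=
  let base := PySem.Int.floordiv total count
  let rem := PySem.Int.mod total count
  (PySem.List.pyRange 0 count 1).map
    (fun i => (i * base + min i rem, base + (if i < rem then 1 else 0)))

-- ===== PRECONDITION & SPEC =====
-- Pre_ excludes count = 0 (A raises ZeroDivisionError) and count < 0 with total ≠ 0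
-- (A's 'assert pos == total' fails, raising AssertionError): it admits exactly the inputs A returns on.
def Pre_axis_segments (total : Int) (count : Int) : Prop :=
  0 < count ∨ (count < 0 ∧ total = 0)
instance (total : Int) (count : Int) : Decidable (Pre_axis_segments total count) := by
  unfold Pre_axis_segments; infer_instance
def pvWitness_axis_segments : Int × Int := (7, 3)

def Spec_axis_segments (total : Int) (count : Int) (out : List (Int × Int)) : Prop :=
  out = axis_segments_alt total count
instance (total : Int) (count : Int) (out : List (Int × Int)) : Decidable (Spec_axis_segments total count out) := by
  unfold Spec_axis_segments; infer_instance

-- ===== CLAIM (what is proved, stated in full; the proofs are below) =====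
def Claim_equal_axis_segments : Prop := ∀ (total : Int) (count : Int), Dom_axis_segments total count → Pre_axis_segments total count → Spec_axis_segments total count (axis_segments total count)

-- ===== LEMMAS AND PROOFS =====

-- Loop invariant: after folding over range(0, n), out is the closed-form map and pos = n*base + min n rem.
theorem axis_segments_fold (base rem : Int) (hrem : 0 ≤ rem) (n : Nat) :
    (PySem.List.pyRange 0 n 1).foldl
      (fun (s : List (Int × Int) × Int) i =>
        let sz := base + (if i < rem then 1 else 0)
        (s.1 ++ [(s.2, sz)], s.2 + sz))
      ([], 0)
    = ((PySem.List.pyRange 0 n 1).map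
        (fun i => (i * base + min i rem, base + (if i < rem then 1 else 0))),
       (n : Int) * base + min (n : Int) rem) := by
  induction n with
  | zero => simp [PySem.List.pyRange_one_eq_nil]; omega
  | succ k ih =>
    have h : ((k : Int) + 1) = ((k + 1 : Nat) : Int) := by push_cast; ring
    have hsplit : PySem.List.pyRange 0 ((k + 1 : Nat) : Int) 1
        = PySem.List.pyRange 0 (k : Int) 1 ++ [(k : Int)] := by
      rw [← h, PySem.List.pyRange_one_succ_right (by exact_mod_cast Nat.zero_le k)]
    have hmin : min ((k + 1 : Nat) : Int) rem
        = min (k : Int) rem + (if (k : Int) < rem then 1 else 0) := by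
      split_ifs with hk <;> push_cast <;> omega
    rw [hsplit, List.foldl_append, List.map_append, ih]
    simp only [List.foldl_cons, List.foldl_nil, List.map_cons, List.map_nil, Prod.mk.injEq]
    refine ⟨by trivial, ?_⟩
    rw [hmin]
    push_cast
    ring

-- ===== VERDICT (by name: the statement is the Claim_ definition above) =====
theorem axis_segments_spec : Claim_equal_axis_segments := by
  intro total count _ hpre
  unfold Spec_axis_segments axis_segments axis_segments_alt
  rcases hpre with hpos | ⟨hneg, _⟩
  · have hc : count = ((count.toNat : Nat) : Int) := by omega
    simp only
    rw [hc, axis_segments_fold _ _ (by exact PySem.Int.mod_nonneg _ (by omega))]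
  · simp [PySem.List.pyRange_one_eq_nil (by omega : count ≤ 0)]
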